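-- pv_equiv track=rewrite | github.com/sorcel94/options-pricing | pricer/option_interpolation.py | _find_nearest_lower_upper_strike
-- ===== SOURCE A (Python) =====
-- def _find_nearest_lower_upper_strike(expiry_strike_data, target_strike):
--     strike_data = sorted(expiry_strike_data)
--     n = len(strike_data)
--     lower = None
--     upper = None
--
--     # Check if target_strike is outside the strike range
--     if target_strike <= strike_data[0]:
--         return None, strike_data[0]
--     elif target_strike >= strike_data[-1]:
--         return strike_data[-1], None
--
--     # Binary search for the nearest lower and upper strikes
--     left = 0
--     right = n - 1
--     while left <= right:
--         mid = (left + right) // 2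
--         if strike_data[mid] == target_strike:
--             return target_strike, target_strike
--         elif strike_data[mid] < target_strike:
--             lower = strike_data[mid]
--             left = mid + 1
--         else:
--             upper = strike_data[mid]
--             right = mid - 1
--
--     return lower, upper
-- ===== SOURCE B (Python) =====
-- def _find_nearest_lower_upper_strike(expiry_strike_data, target_strike):
--     # Single linear pass: track min, max, best strike below and above the
--     # target, and whether the target itself occurs. No sort needed.
--     mn = mx = lo = hi = None
--     found = False
--     for x in expiry_strike_data:
--         if mn is None or x < mn:
--             mn = x
--         if mx is None or x > mx:
--             mx = x
--         if x == target_strike: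
--             found = True
--         elif x < target_strike:
--             if lo is None or x > lo:
--                 lo = x
--         else:
--             if hi is None or x < hi:
--                 hi = x
--     if target_strike <= mn:
--         return None, mn
--     if target_strike >= mx:
--         return mx, None
--     if found:
--         return target_strike, target_strike
--     return lo, hi
-- ===== Notes on version B (the rewrite author's own statement) =====
-- stated objective: alternative
-- what changed: Replaced sort + binary search by a single linear pass that tracks the minimum, maximum, greatest element below the target, least element above it, and an exact-match flag, then applies the same boundary branches.
import Mathlib
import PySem

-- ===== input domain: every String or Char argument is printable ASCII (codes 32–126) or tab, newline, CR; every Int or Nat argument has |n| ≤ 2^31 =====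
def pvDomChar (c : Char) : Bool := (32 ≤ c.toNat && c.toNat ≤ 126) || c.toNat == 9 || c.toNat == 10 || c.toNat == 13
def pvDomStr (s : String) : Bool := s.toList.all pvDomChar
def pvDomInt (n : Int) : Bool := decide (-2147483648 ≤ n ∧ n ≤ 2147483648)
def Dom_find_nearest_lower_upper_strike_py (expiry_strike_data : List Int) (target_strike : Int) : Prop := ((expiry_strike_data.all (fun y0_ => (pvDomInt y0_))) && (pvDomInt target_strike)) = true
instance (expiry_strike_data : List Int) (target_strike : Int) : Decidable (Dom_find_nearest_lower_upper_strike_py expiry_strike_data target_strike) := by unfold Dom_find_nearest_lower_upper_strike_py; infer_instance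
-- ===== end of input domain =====

-- B replaces sort + binary search by one linear pass (min/max/below/above/found); proved equal to A on nonempty lists (A raises IndexError on []).


-- ===== PORT A =====
-- the while-loop of A: state (left, right, lower, upper); pyGetD's default is never
-- used (mid is always in range when the loop body runs, proved below)
def pyBisectA (s : List Int) (t : Int) : Nat → Int → Int → Option Int → Option Int → Option Int × Option Int
  | 0, _, _, lower, upper => (lower, upper)  -- fuel guard only: never reached (the interval shrinks each iteration)
  | fuel + 1, left, right, lower, upper =>
    if left ≤ right then
      let mid := PySem.Int.floordiv (left + right) 2
      let v := PySem.List.pyGetD s mid 0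
      if v = t then (some t, some t)
      else if v < t then pyBisectA s t fuel (mid + 1) right (some v) upper
      else pyBisectA s t fuel left (mid - 1) lower (some v)
    else (lower, upper)

def find_nearest_lower_upper_strike_py (expiry_strike_data : List Int) (target_strike : Int) : Option Int × Option Int :=
  let strike_data := PySem.List.sorted expiry_strike_data (fun x => x) false
  let n : Int := strike_data.length
  if _hs : strike_data = [] then (none, none)  -- Python: strike_data[0] raises IndexError; excluded by Pre_
  else
    let first := PySem.List.pyGetD strike_data 0 0          -- strike_data[0]
    let last := PySem.List.pyGetD strike_data (-1) 0        -- strike_data[-1]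
    if target_strike ≤ first then (none, some first)
    else if target_strike ≥ last then (some last, none)
    else pyBisectA strike_data target_strike (strike_data.length + 1) 0 (n - 1) none none

-- ===== PORT B =====
-- one step of B's for-loop over the state (mn, mx, lo, hi, found)
def updMin (x : Int) : Option Int → Option Int
  | none => some x
  | some m => if x < m then some x else some m

def updMax (x : Int) : Option Int → Option Int
  | none => some x
  | some m => if x > m then some x else some m

def altStep (t : Int) (st : Option Int × Option Int × Option Int × Option Int × Bool) (x : Int) :
    Option Int × Option Int × Option Int × Option Int × Bool :=
  let (mn, mx, lo, hi, found) := st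
  if x = t then (updMin x mn, updMax x mx, lo, hi, true)
  else if x < t then (updMin x mn, updMax x mx, updMax x lo, hi, found)
  else (updMin x mn, updMax x mx, lo, updMin x hi, found)

def find_nearest_lower_upper_strike_py_alt (expiry_strike_data : List Int) (target_strike : Int) : Option Int × Option Int :=
  match expiry_strike_data.foldl (altStep target_strike) (none, none, none, none, false) with
  | (some mn, some mx, lo, hi, found) =>
    if target_strike ≤ mn then (none, some mn)
    else if target_strike ≥ mx then (some mx, none)
    else if found then (some target_strike, some target_strike)
    else (lo, hi)
  | _ => (none, none)  -- only for the empty input, where Python B raises TypeError; excluded by Pre_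

-- ===== PRECONDITION & SPEC =====
-- Pre_ excludes only the empty list, on which A raises IndexError (and B raises TypeError).
def Pre_find_nearest_lower_upper_strike_py (expiry_strike_data : List Int) (target_strike : Int) : Prop :=
  expiry_strike_data ≠ []
instance (expiry_strike_data : List Int) (target_strike : Int) : Decidable (Pre_find_nearest_lower_upper_strike_py expiry_strike_data target_strike) := by unfold Pre_find_nearest_lower_upper_strike_py; infer_instance
def pvWitness_find_nearest_lower_upper_strike_py : List Int × Int := ([10, 5, 20], 7)

def Spec_find_nearest_lower_upper_strike_py (expiry_strike_data : List Int) (target_strike : Int) (out : Option Int × Option Int) : Prop := out = find_nearest_lower_upper_strike_py_alt expiry_strike_data target_strike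
instance (expiry_strike_data : List Int) (target_strike : Int) (out : Option Int × Option Int) : Decidable (Spec_find_nearest_lower_upper_strike_py expiry_strike_data target_strike out) := by unfold Spec_find_nearest_lower_upper_strike_py; infer_instance

-- ===== CLAIM (what is proved, stated in full; the proofs are below) =====
def Claim_equal_find_nearest_lower_upper_strike_py : Prop := ∀ (expiry_strike_data : List Int) (target_strike : Int), Dom_find_nearest_lower_upper_strike_py expiry_strike_data target_strike → Pre_find_nearest_lower_upper_strike_py expiry_strike_data target_strike → Spec_find_nearest_lower_upper_strike_py expiry_strike_data target_strike (find_nearest_lower_upper_strike_py expiry_strike_data target_strike)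

-- ===== LEMMAS AND PROOFS =====

-- o is the minimum / maximum / greatest element below t / least element above t of l
def IsMn (l : List Int) : Option Int → Prop
  | none => l = []
  | some m => m ∈ l ∧ ∀ x ∈ l, m ≤ x

def IsMx (l : List Int) : Option Int → Prop
  | none => l = []
  | some m => m ∈ l ∧ ∀ x ∈ l, x ≤ m

def IsLow (t : Int) (l : List Int) : Option Int → Prop
  | none => ∀ x ∈ l, ¬ x < t
  | some p => p ∈ l ∧ p < t ∧ ∀ x ∈ l, x < t → x ≤ p

def IsHigh (t : Int) (l : List Int) : Option Int → Prop
  | none => ∀ x ∈ l, ¬ t < x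
  | some q => q ∈ l ∧ t < q ∧ ∀ x ∈ l, t < x → q ≤ x

theorem IsLow_unique {t : Int} {l l' : List Int} {o o' : Option Int}
    (hm : ∀ x, x ∈ l ↔ x ∈ l') (h : IsLow t l o) (h' : IsLow t l' o') : o = o' := by
  match o, o' with
  | none, none => rfl
  | none, some q => exact absurd h'.2.1 (h q ((hm q).mpr h'.1))
  | some p, none => exact absurd h.2.1 (h' p ((hm p).mp h.1))
  | some p, some q =>
    have h1 := h'.2.2 p ((hm p).mp h.1) h.2.1
    have h2 := h.2.2 q ((hm q).mpr h'.1) h'.2.1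
    simp [le_antisymm h2 h1]

theorem IsHigh_unique {t : Int} {l l' : List Int} {o o' : Option Int}
    (hm : ∀ x, x ∈ l ↔ x ∈ l') (h : IsHigh t l o) (h' : IsHigh t l' o') : o = o' := by
  match o, o' with
  | none, none => rfl
  | none, some q => exact absurd h'.2.1 (h q ((hm q).mpr h'.1))
  | some p, none => exact absurd h.2.1 (h' p ((hm p).mp h.1))
  | some p, some q =>
    have h1 := h'.2.2 p ((hm p).mp h.1) h.2.1
    have h2 := h.2.2 q ((hm q).mpr h'.1) h'.2.1
    simp [le_antisymm h1 h2]

theorem IsMn_unique {l l' : List Int} {m m' : Int}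
    (hm : ∀ x, x ∈ l ↔ x ∈ l') (h : IsMn l (some m)) (h' : IsMn l' (some m')) : m = m' :=
  le_antisymm (h.2 m' ((hm m').mpr h'.1)) (h'.2 m ((hm m).mp h.1))

theorem IsMx_unique {l l' : List Int} {m m' : Int}
    (hm : ∀ x, x ∈ l ↔ x ∈ l') (h : IsMx l (some m)) (h' : IsMx l' (some m')) : m = m' :=
  le_antisymm (h'.2 m ((hm m).mp h.1)) (h.2 m' ((hm m').mpr h'.1))

-- B's loop invariant over the elements already seen
def InvB (t : Int) (seen : List Int) (st : Option Int × Option Int × Option Int × Option Int × Bool) : Prop :=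
  IsMn seen st.1 ∧ IsMx seen st.2.1 ∧ IsLow t seen st.2.2.1 ∧ IsHigh t seen st.2.2.2.1 ∧
    (st.2.2.2.2 = true ↔ t ∈ seen)

theorem IsMn_snoc {seen : List Int} {mn : Option Int} (h : IsMn seen mn) (x : Int) :
    IsMn (seen ++ [x]) (updMin x mn) := by
  unfold updMin
  match mn with
  | none => have hs : seen = [] := h; subst hs; exact ⟨by simp, by simp⟩
  | some m =>
    obtain ⟨hmem, hle⟩ := h
    by_cases hc : x < m <;>
      simp only [hc, if_true, if_false, IsMn, List.mem_append, List.mem_singleton]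
    · refine ⟨by simp, fun y hy => ?_⟩
      rcases hy with hy | hy
      · have := hle y hy; omega
      · omega
    · refine ⟨Or.inl hmem, fun y hy => ?_⟩
      rcases hy with hy | hy
      · exact hle y hy
      · omega

theorem IsMx_snoc {seen : List Int} {mx : Option Int} (h : IsMx seen mx) (x : Int) :
    IsMx (seen ++ [x]) (updMax x mx) := by
  unfold updMax
  match mx with
  | none => have hs : seen = [] := h; subst hs; exact ⟨by simp, by simp⟩
  | some m =>
    obtain ⟨hmem, hle⟩ := h
    by_cases hc : x > m <;>
      simp only [hc, if_true, if_false, IsMx, List.mem_append, List.mem_singleton]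
    · refine ⟨by simp, fun y hy => ?_⟩
      rcases hy with hy | hy
      · have := hle y hy; omega
      · omega
    · refine ⟨Or.inl hmem, fun y hy => ?_⟩
      rcases hy with hy | hy
      · exact hle y hy
      · omega

theorem IsLow_snoc_lt {t : Int} {seen : List Int} {lo : Option Int} (h : IsLow t seen lo) {x : Int} (hx : x < t) :
    IsLow t (seen ++ [x]) (updMax x lo) := by
  unfold updMax
  match lo with
  | none =>
    refine ⟨by simp, hx, fun y hy hyt => ?_⟩
    rcases List.mem_append.1 hy with hy | hy
    · exact absurd hyt (h y hy)
    · rw [List.mem_singleton] at hy; omega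
  | some m =>
    obtain ⟨hmem, hmt, hle⟩ := h
    by_cases hc : x > m <;>
      simp only [hc, if_true, if_false, IsLow, List.mem_append, List.mem_singleton]
    · refine ⟨by simp, hx, fun y hy hyt => ?_⟩
      rcases hy with hy | hy
      · have := hle y hy hyt; omega
      · omega
    · refine ⟨Or.inl hmem, hmt, fun y hy hyt => ?_⟩
      rcases hy with hy | hy
      · exact hle y hy hyt
      · omega

theorem IsLow_snoc_ge {t : Int} {seen : List Int} {lo : Option Int} (h : IsLow t seen lo) {x : Int} (hx : ¬ x < t) :
    IsLow t (seen ++ [x]) lo := by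
  match lo with
  | none =>
    intro y hy
    rcases List.mem_append.1 hy with hy | hy
    · exact h y hy
    · rw [List.mem_singleton] at hy; omega
  | some m =>
    obtain ⟨hmem, hmt, hle⟩ := h
    refine ⟨by simp [hmem], hmt, fun y hy hyt => ?_⟩
    rcases List.mem_append.1 hy with hy | hy
    · exact hle y hy hyt
    · rw [List.mem_singleton] at hy; omega

theorem IsHigh_snoc_gt {t : Int} {seen : List Int} {hi : Option Int} (h : IsHigh t seen hi) {x : Int} (hx : t < x) :
    IsHigh t (seen ++ [x]) (updMin x hi) := by
  unfold updMin
  match hi with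
  | none =>
    refine ⟨by simp, hx, fun y hy hyt => ?_⟩
    rcases List.mem_append.1 hy with hy | hy
    · exact absurd hyt (h y hy)
    · rw [List.mem_singleton] at hy; omega
  | some m =>
    obtain ⟨hmem, hmt, hle⟩ := h
    by_cases hc : x < m <;>
      simp only [hc, if_true, if_false, IsHigh, List.mem_append, List.mem_singleton]
    · refine ⟨by simp, hx, fun y hy hyt => ?_⟩
      rcases hy with hy | hy
      · have := hle y hy hyt; omega
      · omega
    · refine ⟨Or.inl hmem, hmt, fun y hy hyt => ?_⟩
      rcases hy with hy | hy
      · exact hle y hy hyt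
      · omega

theorem IsHigh_snoc_le {t : Int} {seen : List Int} {hi : Option Int} (h : IsHigh t seen hi) {x : Int} (hx : ¬ t < x) :
    IsHigh t (seen ++ [x]) hi := by
  match hi with
  | none =>
    intro y hy
    rcases List.mem_append.1 hy with hy | hy
    · exact h y hy
    · rw [List.mem_singleton] at hy; omega
  | some m =>
    obtain ⟨hmem, hmt, hle⟩ := h
    refine ⟨by simp [hmem], hmt, fun y hy hyt => ?_⟩
    rcases List.mem_append.1 hy with hy | hy
    · exact hle y hy hyt
    · rw [List.mem_singleton] at hy; omega

theorem altStep_inv {t : Int} {seen : List Int} {st} (h : InvB t seen st) (x : Int) :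
    InvB t (seen ++ [x]) (altStep t st x) := by
  obtain ⟨mn, mx, lo, hi, found⟩ := st
  obtain ⟨h1, h2, h3, h4, h5⟩ := h
  by_cases hxt : x = t
  · subst hxt
    simp only [altStep]
    exact ⟨IsMn_snoc h1 x, IsMx_snoc h2 x, IsLow_snoc_ge h3 (lt_irrefl x),
      IsHigh_snoc_le h4 (lt_irrefl x), by simp⟩
  · by_cases hxlt : x < t
    · simp only [altStep, if_neg hxt, if_pos hxlt]
      exact ⟨IsMn_snoc h1 x, IsMx_snoc h2 x, IsLow_snoc_lt h3 hxlt,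
        IsHigh_snoc_le h4 (by omega), by simpa [Ne.symm hxt] using h5⟩
    · simp only [altStep, if_neg hxt, if_neg hxlt]
      exact ⟨IsMn_snoc h1 x, IsMx_snoc h2 x, IsLow_snoc_ge h3 hxlt,
        IsHigh_snoc_gt h4 (by omega), by simpa [Ne.symm hxt] using h5⟩

theorem foldB_inv (t : Int) : ∀ (l seen : List Int) (st), InvB t seen st →
    InvB t (seen ++ l) (l.foldl (altStep t) st) := by
  intro l
  induction l with
  | nil => intro seen st h; simpa using h
  | cons y l' ih =>
    intro seen st h
    have := ih (seen ++ [y]) (altStep t st y) (altStep_inv h y)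
    simpa [List.foldl_cons, List.append_assoc] using this

theorem invB_data (t : Int) (l : List Int) :
    InvB t l (l.foldl (altStep t) (none, none, none, none, false)) := by
  have := foldB_inv t l [] (none, none, none, none, false)
    ⟨rfl, rfl, by intro x hx; simp at hx, by intro x hx; simp at hx, by simp⟩
  simpa using this

-- sorted-list index facts
theorem sorted_getD_mono {s : List Int} (hp : List.Pairwise (· ≤ ·) s) {i j : Nat}
    (hij : i ≤ j) (hj : j < s.length) : s.getD i 0 ≤ s.getD j 0 := by
  rcases Nat.lt_or_ge i j with h | h
  · rw [List.getD_eq_getElem s 0 (by omega), List.getD_eq_getElem s 0 hj]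
    exact (List.pairwise_iff_getElem.mp hp) i j (by omega) hj h
  · have : i = j := by omega
    subst this; rfl

theorem mem_iff_getD {s : List Int} {x : Int} :
    x ∈ s ↔ ∃ i : Nat, i < s.length ∧ s.getD i 0 = x := by
  constructor
  · intro h
    obtain ⟨i, hi, hx⟩ := List.mem_iff_getElem.mp h
    exact ⟨i, hi, by rw [List.getD_eq_getElem s 0 hi]; exact hx⟩
  · rintro ⟨i, hi, hx⟩
    rw [List.getD_eq_getElem s 0 hi] at hx
    exact hx ▸ List.getElem_mem hi

-- the binary-search loop of A computes the exact match, or the predecessor/successor pair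
theorem pyBisectA_spec (s : List Int) (t : Int) (hp : List.Pairwise (· ≤ ·) s)
    (hn : 0 < s.length) (hlo : s.getD 0 0 < t) (hhi : t < s.getD (s.length - 1) 0) :
    ∀ (fuel : Nat) (left right : Int) (lower upper : Option Int),
    (right + 1 - left).toNat < fuel →
    0 ≤ left → left ≤ right + 1 → right ≤ (s.length : Int) - 1 →
    lower = (if left = 0 then none else some (s.getD (left - 1).toNat 0)) →
    upper = (if right = (s.length : Int) - 1 then none else some (s.getD (right + 1).toNat 0)) →
    (0 < left → s.getD (left - 1).toNat 0 < t) →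
    (right < (s.length : Int) - 1 → t < s.getD (right + 1).toNat 0) →
    (t ∈ s → pyBisectA s t fuel left right lower upper = (some t, some t)) ∧
    (t ∉ s → IsLow t s (pyBisectA s t fuel left right lower upper).1 ∧
             IsHigh t s (pyBisectA s t fuel left right lower upper).2) := by
  intro fuel
  induction fuel with
  | zero => intro left right lower upper hfuel; omega
  | succ fuel ih =>
    intro left right lower upper hfuel hl0 hlr hrn hlow hup hblo hbhi
    by_cases h : left ≤ right
    · -- loop body runs
      have hmidb := PySem.Int.floordiv_two_mid_bounds h
      set mid := PySem.Int.floordiv (left + right) 2 with hmid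
      have hmid0 : 0 ≤ mid := le_trans hl0 hmidb.1
      have hmidn : mid < (s.length : Int) := by omega
      have hvget : PySem.List.pyGetD s mid 0 = s.getD mid.toNat 0 := by
        rw [PySem.List.pyGetD_eq_getElem s 0 hmid0 hmidn, List.getD_eq_getElem s 0 (by omega)]
      rw [pyBisectA, if_pos h]
      simp only [← hmid, hvget]
      set v := s.getD mid.toNat 0 with hv
      have hvmem : v ∈ s := mem_iff_getD.mpr ⟨mid.toNat, by omega, rfl⟩
      by_cases hvt : v = t
      · rw [if_pos hvt]
        exact ⟨fun _ => rfl, fun hnot => absurd (hvt ▸ hvmem) hnot⟩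
      · rw [if_neg hvt]
        by_cases hvlt : v < t
        · rw [if_pos hvlt]
          refine ih (mid + 1) right (some v) upper
            (by omega) (by omega) (by omega) hrn ?_ hup ?_ hbhi
          · rw [if_neg (by omega)]
            have h1 : mid + 1 - 1 = mid := by omega
            rw [h1, hv]
          · intro _
            have h1 : (mid + 1 - 1).toNat = mid.toNat := by omega
            rw [h1, ← hv]; exact hvlt
        · rw [if_neg hvlt]
          refine ih left (mid - 1) lower (some v)
            (by omega) hl0 (by omega) (by omega) hlow ?_ hblo ?_
          · rw [if_neg (by omega)]
            have h1 : mid - 1 + 1 = mid := by omega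
            rw [h1, hv]
          · intro _
            have h1 : (mid - 1 + 1).toNat = mid.toNat := by omega
            rw [h1, ← hv]; omega
    · -- loop exits: left = right + 1
      rw [pyBisectA, if_neg h]
      have hleq : left = right + 1 := by omega
      have hlpos : 0 < left := by
        by_contra hc
        have hl : left = 0 := by omega
        have hr : right = -1 := by omega
        have hr1 : right < (s.length : Int) - 1 := by omega
        have h2 := hbhi hr1
        have h3 : (right + 1).toNat = 0 := by omega
        rw [h3] at h2
        omega
      have hrsmall : right < (s.length : Int) - 1 := by
        by_contra hc
        have hr : right = (s.length : Int) - 1 := by omega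
        have := hblo hlpos
        have hln : (left - 1).toNat = s.length - 1 := by omega
        rw [hln] at this
        omega
      have hlow' : lower = some (s.getD (left - 1).toNat 0) := by rw [hlow, if_neg (by omega)]
      have hup' : upper = some (s.getD (right + 1).toNat 0) := by rw [hup, if_neg (by omega)]
      have hblo' := hblo hlpos
      have hbhi' := hbhi hrsmall
      have hltn : (left - 1).toNat + 1 = (right + 1).toNat := by omega
      -- every index below left is < t, every index from left on is > t
      have hsplit : ∀ i : Nat, i < s.length → (if (i : Int) < left then s.getD i 0 < t else t < s.getD i 0) := by
        intro i hi
        by_cases hc : (i : Int) < left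
        · rw [if_pos hc]
          exact lt_of_le_of_lt (sorted_getD_mono hp (by omega) (by omega)) hblo'
        · rw [if_neg hc]
          exact lt_of_lt_of_le hbhi' (sorted_getD_mono hp (by omega) hi)
      have hnotmem : t ∉ s := by
        intro hmem
        obtain ⟨i, hi, hx⟩ := mem_iff_getD.mp hmem
        have hsp := hsplit i hi
        by_cases hc : (i : Int) < left
        · rw [if_pos hc] at hsp; omega
        · rw [if_neg hc] at hsp; omega
      refine ⟨fun hmem => absurd hmem hnotmem, fun _ => ?_⟩
      rw [hlow', hup']
      constructor
      · refine ⟨mem_iff_getD.mpr ⟨(left - 1).toNat, by omega, rfl⟩, hblo', ?_⟩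
        intro x hx hxt
        obtain ⟨i, hi, hix⟩ := mem_iff_getD.mp hx
        have hsp := hsplit i hi
        by_cases hc : (i : Int) < left
        · exact hix ▸ sorted_getD_mono hp (by omega) (by omega)
        · rw [if_neg hc] at hsp; omega
      · refine ⟨mem_iff_getD.mpr ⟨(right + 1).toNat, by omega, rfl⟩, hbhi', ?_⟩
        intro x hx hxt
        obtain ⟨i, hi, hix⟩ := mem_iff_getD.mp hx
        have hsp := hsplit i hi
        by_cases hc : (i : Int) < left
        · rw [if_pos hc] at hsp; omega
        · subst hix
          calc s.getD (right + 1).toNat 0 ≤ s.getD i 0 := sorted_getD_mono hp (by omega) hi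

-- head and last of a sorted list are its minimum and maximum
theorem sorted_head_isMn {s : List Int} (hp : List.Pairwise (· ≤ ·) s) (hn : 0 < s.length) :
    IsMn s (some (s.getD 0 0)) := by
  refine ⟨mem_iff_getD.mpr ⟨0, hn, rfl⟩, fun x hx => ?_⟩
  obtain ⟨i, hi, hix⟩ := mem_iff_getD.mp hx
  exact hix ▸ sorted_getD_mono hp (Nat.zero_le i) hi

theorem sorted_last_isMx {s : List Int} (hp : List.Pairwise (· ≤ ·) s) (hn : 0 < s.length) :
    IsMx s (some (s.getD (s.length - 1) 0)) := by
  refine ⟨mem_iff_getD.mpr ⟨s.length - 1, by omega, rfl⟩, fun x hx => ?_⟩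
  obtain ⟨i, hi, hix⟩ := mem_iff_getD.mp hx
  exact hix ▸ sorted_getD_mono hp (by omega) (by omega)

-- ===== VERDICT (by name: the statement is the Claim_ definition above) =====
theorem find_nearest_lower_upper_strike_py_spec : Claim_equal_find_nearest_lower_upper_strike_py := by
  intro data t _hdom hpre
  unfold Spec_find_nearest_lower_upper_strike_py
  unfold Pre_find_nearest_lower_upper_strike_py at hpre
  -- facts about the sorted copy used by A
  have hperm : (PySem.List.sorted data (fun x => x) false).Perm data := PySem.List.sorted_perm data _ _
  set s := PySem.List.sorted data (fun x => x) false with hs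
  have hmem : ∀ x, x ∈ s ↔ x ∈ data := fun x => hperm.mem_iff
  have hp : List.Pairwise (· ≤ ·) s := PySem.List.sorted_pairwise data (fun x => x)
  have hsne : s ≠ [] := by
    intro hnil
    rw [hs] at hnil
    exact hpre ((PySem.List.sorted_eq_nil_iff data (fun x => x) false).mp hnil)
  have hn : 0 < s.length := List.length_pos_of_ne_nil hsne
  -- B's loop invariant at the end of the pass
  rcases hst : data.foldl (altStep t) (none, none, none, none, false) with ⟨mn, mx, lo, hi, found⟩
  have hInv := invB_data t data
  rw [hst] at hInv
  obtain ⟨h1, h2, h3, h4, h5⟩ := hInv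
  match mn, mx, h1, h2 with
  | none, _, h1, _ => exact absurd (show data = [] from h1) hpre
  | some mnv, none, _, h2 => exact absurd (show data = [] from h2) hpre
  | some mnv, some mxv, h1, h2 =>
    -- the head/last of s are the same min/max B computed
    have hA1 := sorted_head_isMn hp hn
    have hA2 := sorted_last_isMx hp hn
    have emn : s.getD 0 0 = mnv := by
      have := IsMn_unique hmem hA1 h1
      simpa using this
    have emx : s.getD (s.length - 1) 0 = mxv := by
      have := IsMx_unique hmem hA2 h2
      simpa using this
    -- unfold both ports
    show find_nearest_lower_upper_strike_py data t = _
    unfold find_nearest_lower_upper_strike_py find_nearest_lower_upper_strike_py_alt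
    rw [hst]
    simp only [← hs, dif_neg hsne, PySem.List.pyGetD_zero]
    have hlast : PySem.List.pyGetD s (-1) 0 = s.getD (s.length - 1) 0 := by
      rw [PySem.List.pyGetD_neg_one s 0 hsne, List.getLast_eq_getElem, List.getD_eq_getElem s 0 (by omega)]
    rw [hlast, ← emn, ← emx]
    have hspec := pyBisectA_spec s t hp hn
    split_ifs with hb1 hb2 hf
    · rfl
    · rfl
    · -- interior, exact match found by B's pass
      have hmt : t ∈ s := (hmem t).mpr (h5.mp hf)
      exact (hspec (by omega) (by omega)
        (s.length + 1) 0 ((s.length : Int) - 1) none none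
        (by omega) (le_refl 0) (by omega) (by omega) (by rw [if_pos rfl]) (by rw [if_pos rfl])
        (by intro h; omega) (by intro h; omega)).1 hmt
    · -- interior, no exact match: predecessor/successor pair
      have hmt : t ∉ s := fun hm => hf (h5.mpr ((hmem t).mp hm))
      obtain ⟨hL, hH⟩ := (hspec (by omega) (by omega)
        (s.length + 1) 0 ((s.length : Int) - 1) none none
        (by omega) (le_refl 0) (by omega) (by omega) (by rw [if_pos rfl]) (by rw [if_pos rfl])
        (by intro h; omega) (by intro h; omega)).2 hmt
      exact Prod.ext (IsLow_unique hmem hL h3) (IsHigh_unique hmem hH h4)
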